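-- pv_equiv track=rewrite | github.com/mbaas038/master_thesis | balance_you_ted.py | file_to_blocks
-- ===== SOURCE A (Python) =====
-- def file_to_blocks(en, nl):
--     en_blocks = {}
--     en_block = []
--     nl_blocks = {"jij": {}, "je": {}, "jullie": {}, "u": {}}
--     nl_block = []
--     for line in en:
--         if line == "\n":
--             en_blocks[en_block[0].split(":")[1].strip()] = en_block
--             en_block = []
--         else:
--             en_block.append(line)
--
--     for line in nl:
--         if line == "\n":
--             nl_blocks[nl_block[1].split(":")[1].strip()][nl_block[0].split(":")[1].strip()] = nl_block
--             nl_block = []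
--         else:
--             nl_block.append(line)
--
--     return en_blocks, nl_blocks
-- ===== SOURCE B (Python) =====
-- def _blocks(lines):
--     # split into the complete (sentinel-terminated) blocks; the trailing
--     # unterminated block (if any) is not emitted
--     blocks = []
--     while "\n" in lines:
--         i = lines.index("\n")
--         blocks.append(lines[:i])
--         lines = lines[i + 1:]
--     return blocks
--
--
-- def file_to_blocks(en, nl):
--     en_blocks = {b[0].split(":")[1].strip(): b for b in _blocks(en)}
--     nl_blocks = {"jij": {}, "je": {}, "jullie": {}, "u": {}}
--     for b in _blocks(nl):
--         nl_blocks[b[1].split(":")[1].strip()][b[0].split(":")[1].strip()] = b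
--     return en_blocks, nl_blocks
-- ===== Notes on version B (the rewrite author's own statement) =====
-- stated objective: alternative
-- what changed: B first cuts each line list into its complete sentinel-terminated blocks with a scan-and-slice helper (find '\n', slice the block off, continue on the rest), then builds the English dict by a dict comprehension over the blocks and the Dutch nested dict by a separate indexing pass, instead of A's single interleaved accumulate-and-flush loop per list.
import Mathlib
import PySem

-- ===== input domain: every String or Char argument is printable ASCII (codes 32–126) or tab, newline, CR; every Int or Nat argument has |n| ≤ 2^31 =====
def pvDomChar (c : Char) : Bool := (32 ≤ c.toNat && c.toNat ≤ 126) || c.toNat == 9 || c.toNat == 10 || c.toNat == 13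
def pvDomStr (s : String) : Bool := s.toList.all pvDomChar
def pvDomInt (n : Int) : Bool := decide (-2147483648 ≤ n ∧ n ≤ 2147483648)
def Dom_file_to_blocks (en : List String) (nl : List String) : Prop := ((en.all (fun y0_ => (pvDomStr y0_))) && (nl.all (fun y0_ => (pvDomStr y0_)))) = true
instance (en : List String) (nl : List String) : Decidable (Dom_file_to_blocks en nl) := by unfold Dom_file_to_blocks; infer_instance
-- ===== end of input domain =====

-- B replaces A's interleaved accumulate-and-flush loops by a split-into-blocks helper
-- followed by separate indexing passes (alternative decomposition, same cost).

-- block[i].split(":")[1].strip()  (Pre_ guarantees both indexings are in range)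
def pvKey (s : String) : String :=
  PySem.Str.strip ((PySem.List.pyGet? ((PySem.Str.split? s ":").getD []) 1).getD "")

-- ===== PORT A =====
def file_to_blocks (en : List String) (nl : List String) :
    (List (String × List String)) × (List (String × List (String × List String))) :=
  -- for line in en: flush en_block into en_blocks on "\n", else append
  let enr := en.foldl
    (fun (st : PySem.Dict String (List String) × List String) line =>
      if line = "\n" then
        (st.1.insert (pvKey ((PySem.List.pyGet? st.2 0).getD "")) st.2, ([] : List String))
      else
        (st.1, st.2 ++ [line]))
    (PySem.Dict.empty, [])
  -- for line in nl: flush nl_block into nl_blocks[key(nl_block[1])] on "\n", else append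
  let nlr := nl.foldl
    (fun (st : PySem.Dict String (PySem.Dict String (List String)) × List String) line =>
      if line = "\n" then
        (PySem.Dict.modify st.1 (pvKey ((PySem.List.pyGet? st.2 1).getD "")) PySem.Dict.empty
           (fun inner => inner.insert (pvKey ((PySem.List.pyGet? st.2 0).getD "")) st.2),
         ([] : List String))
      else
        (st.1, st.2 ++ [line]))
    (PySem.Dict.ofList
      [("jij", PySem.Dict.empty), ("je", PySem.Dict.empty),
       ("jullie", PySem.Dict.empty), ("u", PySem.Dict.empty)], [])
  (enr.1.items, nlr.1.items.map (fun p => (p.1, p.2.items)))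

-- ===== PORT B =====
-- _blocks: while "\n" in lines: i = lines.index("\n"); emit lines[:i]; continue on lines[i+1:]
def pvBlocks (lines : List String) : List (List String) :=
  if h : lines.contains "\n" then
    let i := (PySem.List.index? lines "\n").getD 0
    PySem.List.slice lines none (some (i : Int)) :: pvBlocks (lines.drop (i + 1))
  else
    []
termination_by lines.length
decreasing_by
  have hne : lines ≠ [] := by rintro rfl; simp at h
  have := List.length_pos_iff.mpr hne
  simp only [List.length_drop]
  omega

def file_to_blocks_alt (en : List String) (nl : List String) :
    (List (String × List String)) × (List (String × List (String × List String))) :=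
  -- {key(b[0]): b for b in _blocks(en)}
  let en_blocks := (pvBlocks en).foldl
    (fun (d : PySem.Dict String (List String)) b =>
      d.insert (pvKey ((PySem.List.pyGet? b 0).getD "")) b)
    PySem.Dict.empty
  -- seeded nested dict, then one indexing pass over _blocks(nl)
  let nl_blocks := (pvBlocks nl).foldl
    (fun (d : PySem.Dict String (PySem.Dict String (List String))) b =>
      PySem.Dict.modify d (pvKey ((PySem.List.pyGet? b 1).getD "")) PySem.Dict.empty
        (fun inner => inner.insert (pvKey ((PySem.List.pyGet? b 0).getD "")) b))
    (PySem.Dict.ofList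
      [("jij", PySem.Dict.empty), ("je", PySem.Dict.empty),
       ("jullie", PySem.Dict.empty), ("u", PySem.Dict.empty)])
  (en_blocks.items, nl_blocks.items.map (fun p => (p.1, p.2.items)))

-- ===== PRECONDITION & SPEC =====
-- Pre_ admits exactly the inputs where A returns: every completed ("\n"-terminated) block
-- must be nonempty with ':' in its first line (else IndexError), and a Dutch block must in
-- addition have a second line with ':' whose key is one of the four seeded pronouns (else
-- IndexError/KeyError).
def Pre_file_to_blocks (en : List String) (nl : List String) : Prop :=
  (∀ b ∈ (List.splitOn "\n" en).dropLast,
      b ≠ [] ∧ PySem.Str.isIn ":" (b.headD "") = true) ∧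
  (∀ b ∈ (List.splitOn "\n" nl).dropLast,
      2 ≤ b.length ∧ PySem.Str.isIn ":" (b.headD "") = true ∧
      PySem.Str.isIn ":" (b.getD 1 "") = true ∧
      pvKey (b.getD 1 "") ∈ (["jij", "je", "jullie", "u"] : List String))
instance (en : List String) (nl : List String) : Decidable (Pre_file_to_blocks en nl) := by
  unfold Pre_file_to_blocks; infer_instance

def pvWitness_file_to_blocks : List String × List String :=
  (["id: one", "line", "\n"], ["vorm: doe", "pers: jij", "\n"])

def Spec_file_to_blocks (en : List String) (nl : List String)
    (out : (List (String × List String)) × (List (String × List (String × List String)))) : Prop :=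
  out = file_to_blocks_alt en nl
instance (en : List String) (nl : List String)
    (out : (List (String × List String)) × (List (String × List (String × List String)))) :
    Decidable (Spec_file_to_blocks en nl out) := by
  unfold Spec_file_to_blocks; infer_instance

-- ===== CLAIM (what is proved, stated in full; the proofs are below) =====
def Claim_equal_file_to_blocks : Prop :=
  ∀ (en : List String) (nl : List String), Dom_file_to_blocks en nl →
    Pre_file_to_blocks en nl → Spec_file_to_blocks en nl (file_to_blocks en nl)

-- ===== LEMMAS AND PROOFS =====

-- the blocks A's flush loop processes, starting from a partial block `cur`
def pvGroups (cur : List String) : List String → List (List String)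
  | [] => []
  | l :: ls => if l = "\n" then cur :: pvGroups [] ls else pvGroups (cur ++ [l]) ls

lemma pvGroups_of_not_mem (lines : List String) (h : "\n" ∉ lines) (cur : List String) :
    pvGroups cur lines = [] := by
  induction lines generalizing cur with
  | nil => rfl
  | cons l ls ih =>
    have hl : l ≠ "\n" := fun hl => h (hl ▸ List.mem_cons_self)
    have hls : "\n" ∉ ls := fun hm => h (List.mem_cons_of_mem _ hm)
    simp [pvGroups, hl, ih hls]

lemma pvGroups_append (pre rest cur : List String) (h : "\n" ∉ pre) :
    pvGroups cur (pre ++ "\n" :: rest) = (cur ++ pre) :: pvGroups [] rest := by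
  induction pre generalizing cur with
  | nil => simp [pvGroups]
  | cons p ps ih =>
    have hp : p ≠ "\n" := fun hp => h (hp ▸ List.mem_cons_self)
    have hps : "\n" ∉ ps := fun hm => h (List.mem_cons_of_mem _ hm)
    simp [pvGroups, hp, ih _ hps]

lemma pvBlocks_eq_pvGroups (lines : List String) : pvBlocks lines = pvGroups [] lines := by
  fun_induction pvBlocks lines with
  | case1 lines h i ih =>
    have hmem : "\n" ∈ lines := by simpa using h
    obtain ⟨k, hk⟩ := Option.isSome_iff_exists.mp
      ((PySem.List.index?_isSome_iff lines "\n").mpr hmem)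
    obtain ⟨pre, suf, hdecomp, hlen, hpre⟩ := (PySem.List.index?_eq_some_iff lines "\n" k).mp hk
    have hi : i = k := by simp only [i]; rw [hk]; rfl
    rw [hi] at ih ⊢
    subst hlen hdecomp
    rw [PySem.List.slice_to_natCast]
    have htake : (pre ++ "\n" :: suf).take pre.length = pre := List.take_left
    have hdrop : (pre ++ "\n" :: suf).drop (pre.length + 1) = suf := by
      have : pre ++ "\n" :: suf = (pre ++ ["\n"]) ++ suf := by simp
      rw [this]
      simp
    rw [htake, pvGroups_append _ _ _ hpre]
    rw [hdrop] at ih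
    simp [ih]
  | case2 lines h =>
    exact (pvGroups_of_not_mem lines (by simpa using h) []).symm

-- A's accumulate-and-flush loop, projected to the dict, is a fold of the flush over the blocks
lemma foldl_flush_fst {δ : Type} (f : δ → List String → δ) (ls : List String)
    (d : δ) (cur : List String) :
    (ls.foldl (fun (st : δ × List String) line =>
        if line = "\n" then (f st.1 st.2, ([] : List String)) else (st.1, st.2 ++ [line]))
      (d, cur)).1
      = (pvGroups cur ls).foldl f d := by
  induction ls generalizing d cur with
  | nil => rfl
  | cons l ls ih =>
    by_cases h : l = "\n" <;> simp [pvGroups, h, List.foldl_cons, ih]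

-- ===== VERDICT (by name: the statement is the Claim_ definition above) =====
theorem file_to_blocks_spec : Claim_equal_file_to_blocks := by
  intro en nl _ _
  show file_to_blocks en nl = file_to_blocks_alt en nl
  simp only [file_to_blocks, file_to_blocks_alt, pvBlocks_eq_pvGroups]
  rw [foldl_flush_fst (f := fun (d : PySem.Dict String (List String)) b =>
        d.insert (pvKey ((PySem.List.pyGet? b 0).getD "")) b),
      foldl_flush_fst (f := fun (d : PySem.Dict String (PySem.Dict String (List String))) b =>
        PySem.Dict.modify d (pvKey ((PySem.List.pyGet? b 1).getD "")) PySem.Dict.empty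
          (fun inner => inner.insert (pvKey ((PySem.List.pyGet? b 0).getD "")) b))]
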